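-- pv_equiv track=rewrite | github.com/aver1001/Problem-Solving | 풀이 완료/2143/acmicpc.py | childArr
-- ===== SOURCE A (Python) =====
-- def insertDict(d,num):
--     if num in d:
--         d[num] += 1
--     else:
--         d[num] = 1
--
-- def childArr(Arr,N) :
--     lt, rt = 0,0
--     table = {}
--
--     while lt != N:
--         hap = 0
--
--         while rt != N:
--             hap += Arr[rt]
--             insertDict(table,hap)
--             rt += 1
--
--         lt += 1
--         rt = lt
--     return table
-- ===== SOURCE B (Python) =====
-- def childArr(Arr, N):
--     # Prefix sums: P[k] = Arr[0]+...+Arr[k-1]; every contiguous-subarray sum is P[j]-P[i].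
--     P = [0]
--     s = 0
--     for x in Arr[:N]:
--         s += x
--         P.append(s)
--     table = {}
--     for i in range(N):
--         for j in range(i + 1, N + 1):
--             v = P[j] - P[i]
--             table[v] = table.get(v, 0) + 1
--     return table
-- ===== Notes on version B (the rewrite author's own statement) =====
-- stated objective: alternative
-- what changed: Replaced A's restart-the-running-sum nested while loops (with the shared lt/rt cursor trick) by building a prefix-sum list once and counting P[j]-P[i] for every index pair i<j via dict.get.
import Mathlib
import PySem

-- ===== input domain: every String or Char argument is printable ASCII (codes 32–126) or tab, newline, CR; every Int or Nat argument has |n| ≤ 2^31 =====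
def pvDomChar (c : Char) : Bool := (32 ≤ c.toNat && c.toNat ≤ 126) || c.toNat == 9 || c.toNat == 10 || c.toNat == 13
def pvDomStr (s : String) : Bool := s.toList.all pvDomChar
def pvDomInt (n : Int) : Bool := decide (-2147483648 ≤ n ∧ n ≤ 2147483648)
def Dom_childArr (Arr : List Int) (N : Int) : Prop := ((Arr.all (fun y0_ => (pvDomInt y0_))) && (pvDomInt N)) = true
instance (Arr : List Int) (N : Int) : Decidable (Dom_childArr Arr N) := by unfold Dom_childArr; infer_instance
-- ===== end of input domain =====

-- B replaces A's restart-the-running-sum double while-loop by a prefix-sum list, inserting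
-- P[j]-P[i] for every index pair i<j (same O(N^2) cost; objective: alternative decomposition).

-- ===== PORT A =====
def insertDictA (d : PySem.Dict Int Int) (num : Int) : PySem.Dict Int Int :=
  if d.contains num then d.modify num 0 (· + 1) else d.insert num 1

-- inner 'while rt != N' loop; fuel (N - rt).toNat counts the remaining iterations (exact under Pre_)
def childArrInner (Arr : List Int) (N : Int) :
    Nat → Int → Int → PySem.Dict Int Int → PySem.Dict Int Int
  | 0, _, _, table => table
  | fuel+1, rt, hap, table =>
    if rt = N then table
    else
      let hap' := hap + (PySem.List.pyGet? Arr rt).getD 0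
      childArrInner Arr N fuel (rt + 1) hap' (insertDictA table hap')

-- outer 'while lt != N' loop
def childArrOuter (Arr : List Int) (N : Int) :
    Nat → Int → Int → PySem.Dict Int Int → PySem.Dict Int Int
  | 0, _, _, table => table
  | fuel+1, lt, rt, table =>
    if lt = N then table
    else
      let table' := childArrInner Arr N (N - rt).toNat rt 0 table
      childArrOuter Arr N fuel (lt + 1) (lt + 1) table'

def childArr (Arr : List Int) (N : Int) : List (Int × Int) :=
  (childArrOuter Arr N N.toNat 0 0 PySem.Dict.empty).items

-- ===== PORT B =====
def childArr_alt (Arr : List Int) (N : Int) : List (Int × Int) :=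
  let pr := (PySem.List.slice Arr none (some N)).foldl
      (fun ps x => (ps.1 ++ [ps.2 + x], ps.2 + x)) (([0] : List Int), (0 : Int))
  let P := pr.1
  let table := (PySem.List.pyRange 0 N 1).foldl
    (fun d i =>
      (PySem.List.pyRange (i + 1) (N + 1) 1).foldl
        (fun d j =>
          let v := PySem.List.pyGetD P j 0 - PySem.List.pyGetD P i 0
          d.insert v (d.getD v 0 + 1)) d)
    PySem.Dict.empty
  table.items

-- ===== PRECONDITION & SPEC =====
-- Pre_ excludes exactly the inputs where A raises or diverges: N < 0 or N > len(Arr)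
-- (IndexError once rt reaches len(Arr), or an unbounded loop for negative N).
def Pre_childArr (Arr : List Int) (N : Int) : Prop := 0 ≤ N ∧ N ≤ (Arr.length : Int)
instance (Arr : List Int) (N : Int) : Decidable (Pre_childArr Arr N) := by
  unfold Pre_childArr; infer_instance

def pvWitness_childArr : List Int × Int := ([1, -2, 3], 3)

def Spec_childArr (Arr : List Int) (N : Int) (out : List (Int × Int)) : Prop :=
  out = childArr_alt Arr N
instance (Arr : List Int) (N : Int) (out : List (Int × Int)) : Decidable (Spec_childArr Arr N out) := by
  unfold Spec_childArr; infer_instance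

-- ===== CLAIM (what is proved, stated in full; the proofs are below) =====
def Claim_equal_childArr : Prop := ∀ (Arr : List Int) (N : Int),
  Dom_childArr Arr N → Pre_childArr Arr N → Spec_childArr Arr N (childArr Arr N)

-- ===== LEMMAS AND PROOFS =====

-- prefix sum of the first k elements
def Pf (Arr : List Int) (k : Nat) : Int := ((Arr.take k).sum)

def dstep (d : PySem.Dict Int Int) (x : Int) : PySem.Dict Int Int := d.modify x 0 (· + 1)

-- the values A inserts while lt = i (sums of Arr[i..i+k])
def innerVals (Arr : List Int) (n i : Nat) : List Int :=
  (List.range (n - i)).map (fun k => Pf Arr (i + k + 1) - Pf Arr i)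

theorem insertDictA_eq (d : PySem.Dict Int Int) (x : Int) :
    insertDictA d x = dstep d x := by
  unfold insertDictA dstep
  by_cases h : d.contains x
  · rw [if_pos h]
  · rw [if_neg h]
    show d.insert x 1 = d.insert x (d.getD x 0 + 1)
    rw [PySem.Dict.getD_of_not_contains d 0 (Bool.eq_false_iff.mpr h)]
    norm_num

theorem insert_getD_eq (d : PySem.Dict Int Int) (x : Int) :
    d.insert x (d.getD x 0 + 1) = dstep d x := rfl

theorem Pf_succ (Arr : List Int) (k : Nat) (h : k < Arr.length) :
    Pf Arr (k + 1) = Pf Arr k + Arr[k] := by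
  unfold Pf
  exact List.sum_take_succ Arr k h

theorem inner_eq (Arr : List Int) (n : Nat) (hlen : n ≤ Arr.length) :
    ∀ (f rt : Nat) (hap : Int) (table : PySem.Dict Int Int), rt + f = n →
      childArrInner Arr (n : Int) f (rt : Int) hap table =
        ((List.range f).map (fun k => hap + (Pf Arr (rt + k + 1) - Pf Arr rt))).foldl dstep table := by
  intro f
  induction f with
  | zero => intro rt hap table h; simp [childArrInner]
  | succ f ih =>
    intro rt hap table h
    have hrt : rt < n := by omega
    have hne : (rt : Int) ≠ (n : Int) := by exact_mod_cast Nat.ne_of_lt hrt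
    have hlt : rt < Arr.length := lt_of_lt_of_le hrt hlen
    have hget : (PySem.List.pyGet? Arr (rt : Int)).getD 0 = Arr[rt] := by
      rw [PySem.List.pyGet?_natCast, List.getElem?_eq_getElem hlt]; rfl
    have hPf : Pf Arr (rt + 1) = Pf Arr rt + Arr[rt] := Pf_succ Arr rt hlt
    simp only [childArrInner, if_neg hne, hget]
    have hcast : ((rt : Int) + 1) = (((rt + 1 : Nat)) : Int) := by push_cast; ring
    rw [hcast, ih (rt + 1) _ _ (by omega), insertDictA_eq]
    rw [List.range_succ_eq_map]
    simp only [List.map_cons, List.map_map, List.foldl_cons]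
    have h0 : hap + (Pf Arr (rt + 0 + 1) - Pf Arr rt) = hap + Arr[rt] := by
      simp only [Nat.add_zero, hPf]; ring
    rw [h0]
    congr 1
    apply List.map_congr_left
    intro k _
    simp only [Function.comp_apply, Nat.succ_eq_add_one]
    have h1 : rt + 1 + k + 1 = rt + (k + 1) + 1 := by omega
    rw [h1, hPf]
    ring

theorem outer_eq (Arr : List Int) (n : Nat) (hlen : n ≤ Arr.length) :
    ∀ (f lt : Nat) (table : PySem.Dict Int Int), lt + f = n →
      childArrOuter Arr (n : Int) f (lt : Int) (lt : Int) table =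
        (List.range f).foldl (fun d k => (innerVals Arr n (lt + k)).foldl dstep d) table := by
  intro f
  induction f with
  | zero => intro lt table h; simp [childArrOuter]
  | succ f ih =>
    intro lt table h
    have hlt : lt < n := by omega
    have hne : (lt : Int) ≠ (n : Int) := by exact_mod_cast Nat.ne_of_lt hlt
    simp only [childArrOuter, if_neg hne]
    have hfuel : ((n : Int) - (lt : Int)).toNat = n - lt := by omega
    rw [hfuel, inner_eq Arr n hlen (n - lt) lt 0 table (by omega)]
    have hvals : ((List.range (n - lt)).map (fun k => 0 + (Pf Arr (lt + k + 1) - Pf Arr lt)))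
        = innerVals Arr n lt := by
      unfold innerVals; simp
    rw [hvals]
    have hcast : ((lt : Int) + 1) = (((lt + 1 : Nat)) : Int) := by push_cast; ring
    rw [hcast, ih (lt + 1) _ (by omega)]
    rw [List.range_succ_eq_map]
    simp only [List.foldl_cons, List.foldl_map, Nat.add_zero, Nat.succ_eq_add_one]
    congr 1
    funext d k
    have h1 : lt + 1 + k = lt + (k + 1) := by omega
    rw [h1]

theorem prefix_fold (ys : List Int) :
    ∀ (acc : List Int) (s : Int),
      (ys.foldl (fun ps x => (ps.1 ++ [ps.2 + x], ps.2 + x)) (acc, s)) =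
        (acc ++ (List.range ys.length).map (fun k => s + (ys.take (k + 1)).sum), s + ys.sum) := by
  induction ys with
  | nil => intro acc s; simp
  | cons y ys ih =>
    intro acc s
    simp only [List.foldl_cons]
    rw [ih (acc ++ [s + y]) (s + y)]
    rw [List.length_cons, List.range_succ_eq_map]
    simp only [List.map_cons, List.map_map, Function.comp_def, Nat.succ_eq_add_one,
      List.take_succ_cons, List.sum_cons, List.append_assoc, List.singleton_append,
      Prod.mk.injEq]
    refine ⟨?_, by ring⟩
    simp [add_assoc]

theorem getD_rangeMap (Arr : List Int) (n m : Nat) (hm : m < n + 1) :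
    ((List.range (n + 1)).map (Pf Arr)).getD m 0 = Pf Arr m := by
  simp [List.getD_eq_getElem?_getD, List.getElem?_range hm]

theorem P_eq (Arr : List Int) (n : Nat) (hlen : n ≤ Arr.length) :
    ((Arr.take n).foldl (fun ps x => (ps.1 ++ [ps.2 + x], ps.2 + x)) (([0] : List Int), (0 : Int))).1
      = (List.range (n + 1)).map (Pf Arr) := by
  rw [prefix_fold]
  have hm : (Arr.take n).length = n := by simp; omega
  dsimp only
  rw [hm, List.range_succ_eq_map, List.map_cons, List.map_map, List.singleton_append]
  congr 1
  apply List.map_congr_left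
  intro k hk
  have hk' : k < n := List.mem_range.mp hk
  simp [Pf, List.take_take, Nat.min_eq_left (by omega : k + 1 ≤ n)]

-- ===== VERDICT (by name: the statement is the Claim_ definition above) =====
theorem childArr_spec : Claim_equal_childArr := by
  intro Arr N _ hpre
  unfold Spec_childArr
  obtain ⟨h0, hle⟩ := hpre
  set n := N.toNat with hn
  have hN : N = (n : Int) := by omega
  have hlen : n ≤ Arr.length := by omega
  have hA : childArr Arr N
      = ((List.range n).foldl (fun d k => (innerVals Arr n k).foldl dstep d) PySem.Dict.empty).items := by
    unfold childArr
    rw [hN]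
    have h2 := outer_eq Arr n hlen n 0 PySem.Dict.empty (by omega)
    simp only [Nat.cast_zero, Nat.zero_add] at h2
    rw [Int.toNat_natCast, h2]
  have hB : childArr_alt Arr N
      = ((List.range n).foldl (fun d k => (innerVals Arr n k).foldl dstep d) PySem.Dict.empty).items := by
    unfold childArr_alt
    rw [hN]
    simp only [PySem.List.slice_to_natCast]
    rw [P_eq Arr n hlen]
    have hrange : PySem.List.pyRange 0 (n : Int) 1 = (List.range n).map (fun k => ((k : Nat) : Int)) := by
      rw [PySem.List.pyRange_one]; simp
    rw [hrange, List.foldl_map]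
    congr 1
    apply PySem.List.foldl_congr_mem
    intro d k hk
    have hk' : k < n := List.mem_range.mp hk
    have hri : PySem.List.pyRange ((k : Int) + 1) ((n : Int) + 1) 1
        = (List.range (n - k)).map (fun k2 => ((k : Int) + 1 + (k2 : Nat))) := by
      rw [PySem.List.pyRange_one]
      have : (((n : Int) + 1) - ((k : Int) + 1)).toNat = n - k := by omega
      rw [this]
    rw [hri, List.foldl_map]
    unfold innerVals
    rw [List.foldl_map]
    apply PySem.List.foldl_congr_mem
    intro d2 k2 hk2
    have hk2' : k2 < n - k := List.mem_range.mp hk2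
    have hj : ((k : Int) + 1 + (k2 : Nat)) = (((k + k2 + 1 : Nat)) : Int) := by push_cast; ring
    rw [hj, PySem.List.pyGetD_natCast, PySem.List.pyGetD_natCast,
      getD_rangeMap Arr n _ (by omega), getD_rangeMap Arr n k (by omega)]
    exact insert_getD_eq _ _
  rw [hA, hB]
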